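-- pv_equiv track=rewrite | github.com/GarrettXUPT/papper | verionCon/booleanFunctionVersion2/basicEq.py | XinnerproductB
-- ===== SOURCE A (Python) =====
-- import copy
--
-- def vecMul(vec1, vec2):
--     value = 0
--     for i in range(len(vec1)):
--         value += (vec1[i] * vec2[i])
--     return value % 2
--
-- def XinnerproductB(alltruthTable):
--     resLst = []
--     for eleb in alltruthTable:
--         tmpLst = []
--         for elemx in alltruthTable:
--             tmpLst.append(vecMul(eleb, elemx))
--         resLst.append(copy.deepcopy(tmpLst))
--     return resLst
-- ===== SOURCE B (Python) =====
-- def XinnerproductB(alltruthTable):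
--     # Bit-pack each row's parities into one int; each matrix entry is then
--     # popcount(mask_i & mask_j) & 1 (GF(2) inner product via word-level ops).
--     masks = []
--     for row in alltruthTable:
--         m = 0
--         bit = 1
--         for x in row:
--             m += bit * (x % 2)
--             bit += bit
--         masks.append(m)
--     return [[(mi & mj).bit_count() & 1 for mj in masks] for mi in masks]
-- ===== Notes on version B (the rewrite author's own statement) =====
-- stated objective: faster
-- what changed: B bit-packs each row's parities into one integer once, then computes every matrix entry as popcount(mask_i & mask_j) & 1, instead of re-multiplying and summing the full vectors for each of the n^2 pairs.
import Mathlib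
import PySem

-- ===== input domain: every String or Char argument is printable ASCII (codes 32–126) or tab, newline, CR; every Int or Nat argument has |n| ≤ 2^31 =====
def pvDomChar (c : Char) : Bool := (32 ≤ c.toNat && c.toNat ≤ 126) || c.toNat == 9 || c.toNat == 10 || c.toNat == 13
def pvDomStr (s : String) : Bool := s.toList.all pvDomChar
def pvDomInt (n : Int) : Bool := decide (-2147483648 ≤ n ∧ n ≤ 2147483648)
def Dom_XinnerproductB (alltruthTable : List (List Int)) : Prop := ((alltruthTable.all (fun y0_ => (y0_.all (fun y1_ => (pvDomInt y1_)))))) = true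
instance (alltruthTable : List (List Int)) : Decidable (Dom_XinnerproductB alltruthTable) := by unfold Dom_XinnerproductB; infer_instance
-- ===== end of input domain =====

-- B bit-packs each row's parities into one integer once and computes each matrix entry as
-- popcount(mask_i & mask_j) & 1, instead of re-summing full vector products for every pair (objective: faster).


-- ===== PORT A =====
-- vecMul: value = 0; for i in range(len(vec1)): value += vec1[i] * vec2[i]; return value % 2
-- (indexing ported with pyGetD; Pre_ keeps every index in range, so the default is never read)
def vecMulA (vec1 vec2 : List Int) : Int :=
  PySem.Int.mod
    ((PySem.List.pyRange 0 vec1.length 1).foldl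
      (fun value i => value + PySem.List.pyGetD vec1 i 0 * PySem.List.pyGetD vec2 i 0) 0) 2

def XinnerproductB (alltruthTable : List (List Int)) : List (List Int) :=
  alltruthTable.foldl
    (fun resLst eleb =>
      resLst ++ [alltruthTable.foldl (fun tmpLst elemx => tmpLst ++ [vecMulA eleb elemx]) []])
    []

-- ===== PORT B =====
-- m = 0; bit = 1; for x in row: m += bit * (x % 2); bit += bit; return m
def packMask (row : List Int) : Int :=
  (row.foldl (fun (s : Int × Int) x => (s.1 + s.2 * PySem.Int.mod x 2, s.2 + s.2)) (0, 1)).1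

-- [[(mi & mj).bit_count() & 1 for mj in masks] for mi in masks]
def XinnerproductB_alt (alltruthTable : List (List Int)) : List (List Int) :=
  let masks := alltruthTable.map packMask
  masks.map (fun mi =>
    masks.map (fun mj =>
      PySem.Int.band ((PySem.Int.bitCount (PySem.Int.band mi mj) : Nat) : Int) 1))

-- ===== PRECONDITION & SPEC =====
-- A raises IndexError in vecMul whenever some row is longer than another row;
-- Pre_ demands equal row lengths — exactly the inputs on which A returns.
def Pre_XinnerproductB (alltruthTable : List (List Int)) : Prop :=
  ∀ r ∈ alltruthTable, ∀ s ∈ alltruthTable, r.length = s.length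
instance (alltruthTable : List (List Int)) : Decidable (Pre_XinnerproductB alltruthTable) := by
  unfold Pre_XinnerproductB; infer_instance
def pvWitness_XinnerproductB : List (List Int) := [[1, 0, 1], [0, 1, 1], [1, 1, 1]]

def Spec_XinnerproductB (alltruthTable : List (List Int)) (out : List (List Int)) : Prop := out = XinnerproductB_alt alltruthTable
instance (alltruthTable : List (List Int)) (out : List (List Int)) : Decidable (Spec_XinnerproductB alltruthTable out) := by unfold Spec_XinnerproductB; infer_instance

-- ===== CLAIM (what is proved, stated in full; the proofs are below) =====
def Claim_equal_XinnerproductB : Prop := ∀ (alltruthTable : List (List Int)), Dom_XinnerproductB alltruthTable → Pre_XinnerproductB alltruthTable → Spec_XinnerproductB alltruthTable (XinnerproductB alltruthTable)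

-- ===== LEMMAS AND PROOFS =====

-- little-endian parity packing, as a recursion (the value packMask's loop computes)
def packR : List Int → Nat
  | [] => 0
  | x :: l => (PySem.Int.mod x 2).toNat + 2 * packR l

-- popcount of a Nat, through PySem's Int bitCount
def npc (m : Nat) : Nat := PySem.Int.bitCount (m : Int)

lemma npc_rec (m : Nat) : npc m = m % 2 + npc (m / 2) := by
  rcases Nat.eq_zero_or_pos m with h | h
  · subst h; simp [npc, PySem.Int.bitCount_zero]
  · exact PySem.Int.bitCount_natCast h

lemma packMask_inv (l : List Int) (m b : Int) :
    (l.foldl (fun (s : Int × Int) x => (s.1 + s.2 * PySem.Int.mod x 2, s.2 + s.2)) (m, b)).1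
      = m + b * (packR l : Int) := by
  induction l generalizing m b with
  | nil => simp [packR]
  | cons x l ih =>
      simp only [List.foldl_cons, ih, packR]
      have h0 : (0:Int) ≤ PySem.Int.mod x 2 := PySem.Int.mod_nonneg x (by norm_num)
      push_cast [Int.toNat_of_nonneg h0]
      ring

lemma packMask_eq (l : List Int) : packMask l = (packR l : Int) := by
  rw [packMask, packMask_inv]; ring

-- dot product of two equal-length lists (the sum A's inner loop accumulates)
def dotZ : List Int → List Int → Int
  | x :: r, y :: s => x * y + dotZ r s
  | _, _ => 0

lemma sum_range_dot (r s : List Int) (h : r.length = s.length) :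
    ((List.range r.length).map (fun k => r.getD k 0 * s.getD k 0)).sum = dotZ r s := by
  induction r generalizing s with
  | nil => simp [dotZ]
  | cons x r ih =>
      cases s with
      | nil => simp at h
      | cons y s =>
          simp only [List.length_cons, List.range_succ_eq_map, List.map_cons, List.map_map,
            List.sum_cons, dotZ]
          simp only [List.length_cons, Nat.succ.injEq] at h
          have := ih s h
          simp only [List.getD_cons_zero, Function.comp_def, List.getD_cons_succ]
          rw [this]

lemma vecMulA_eq_dot (r s : List Int) (h : r.length = s.length) :
    vecMulA r s = PySem.Int.mod (dotZ r s) 2 := by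
  unfold vecMulA
  rw [PySem.List.foldl_add, PySem.List.pyRange_one]
  simp only [Int.sub_zero, Int.toNat_natCast, zero_add, List.map_map, Function.comp_def,
    PySem.List.pyGetD_natCast]
  rw [sum_range_dot r s h]

lemma land_step (a b A B : Nat) (ha : a < 2) (hb : b < 2) :
    (a + 2 * A) &&& (b + 2 * B) = a * b + 2 * (A &&& B) := by
  interval_cases a <;> interval_cases b
  · simpa [Nat.bit] using Nat.land_bit false A false B
  · simpa [Nat.bit, Nat.add_comm] using Nat.land_bit false A true B
  · simpa [Nat.bit, Nat.add_comm] using Nat.land_bit true A false B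
  · simpa [Nat.bit, Nat.add_comm] using Nat.land_bit true A true B

lemma npc_bit (a C : Nat) (ha : a < 2) : npc (a + 2 * C) = a + npc C := by
  rw [npc_rec]
  have h1 : (a + 2 * C) % 2 = a := by omega
  have h2 : (a + 2 * C) / 2 = C := by omega
  rw [h1, h2]

-- parity of popcount(packR r & packR s) is the GF(2) inner product
lemma core (r s : List Int) (h : r.length = s.length) :
    ((npc (packR r &&& packR s) % 2 : Nat) : Int) = PySem.Int.mod (dotZ r s) 2 := by
  induction r generalizing s with
  | nil =>
      cases s with
      | nil => simp [packR, dotZ, npc, PySem.Int.bitCount_zero, PySem.Int.mod]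
      | cons y s => simp at h
  | cons x r ih =>
      cases s with
      | nil => simp at h
      | cons y s =>
          simp only [List.length_cons, Nat.succ.injEq] at h
          set a := (PySem.Int.mod x 2).toNat with hadef
          set b := (PySem.Int.mod y 2).toNat with hbdef
          have ha2 : a < 2 := by
            have := PySem.Int.mod_lt x (b := 2) (by norm_num)
            omega
          have hb2 : b < 2 := by
            have := PySem.Int.mod_lt y (b := 2) (by norm_num)
            omega
          have hab : a * b < 2 := by nlinarith
          rw [show packR (x :: r) = a + 2 * packR r from rfl,
              show packR (y :: s) = b + 2 * packR s from rfl,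
              land_step _ _ _ _ ha2 hb2, npc_bit _ _ hab]
          have hx : ((a : Int)) = x % 2 := by
            rw [hadef, Int.toNat_of_nonneg (PySem.Int.mod_nonneg x (by norm_num)),
              PySem.Int.mod_eq_emod_of_pos (by norm_num)]
          have hy : ((b : Int)) = y % 2 := by
            rw [hbdef, Int.toNat_of_nonneg (PySem.Int.mod_nonneg y (by norm_num)),
              PySem.Int.mod_eq_emod_of_pos (by norm_num)]
          have hIH := ih s h
          rw [PySem.Int.mod_eq_emod_of_pos (by norm_num)] at hIH ⊢
          push_cast at hIH
          show (((a * b + npc (packR r &&& packR s)) % 2 : Nat) : Int) = (x * y + dotZ r s) % 2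
          push_cast
          have e1 : ((a : Int) * (b : Int)) % 2 = (x * y) % 2 := by
            rw [hx, hy, ← Int.mul_emod]
          calc ((a : Int) * b + (npc (packR r &&& packR s) : Int)) % 2
              = (((a : Int) * b) % 2 + (npc (packR r &&& packR s) : Int) % 2) % 2 :=
                Int.add_emod _ _ _
            _ = ((x * y) % 2 + dotZ r s % 2) % 2 := by rw [e1, hIH]
            _ = (x * y + dotZ r s) % 2 := (Int.add_emod _ _ _).symm

-- B's matrix entry equals A's, for equal-length rows
lemma entryB_eq (r s : List Int) (h : r.length = s.length) :
    PySem.Int.band ((PySem.Int.bitCount (PySem.Int.band (packMask r) (packMask s)) : Nat) : Int) 1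
      = vecMulA r s := by
  rw [packMask_eq, packMask_eq, PySem.Int.band_natCast, PySem.Int.band_one,
    vecMulA_eq_dot r s h, ← core r s h]
  rw [PySem.Int.mod_eq_emod_of_pos (by norm_num)]
  show ((npc (packR r &&& packR s) : Nat) : Int) % 2 = _
  push_cast
  rfl

lemma foldl_app_map (t : List (List Int)) (g : List Int → Int) (acc : List Int) :
    t.foldl (fun tmp elemx => tmp ++ [g elemx]) acc = acc ++ t.map g :=
  PySem.List.foldl_append_singleton_eq_map (f := g) (l := t) (acc := acc)

-- A's append-loops compute the nested map
lemma outer (t : List (List Int)) (f : List Int → List Int → Int) :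
    t.foldl (fun resLst eleb => resLst ++ [t.foldl (fun tmp elemx => tmp ++ [f eleb elemx]) []]) []
      = t.map (fun eleb => t.map (fun elemx => f eleb elemx)) := by
  rw [PySem.List.foldl_append_singleton_eq_map
    (f := fun eleb => t.foldl (fun tmp elemx => tmp ++ [f eleb elemx]) []) (l := t)]
  simp only [List.nil_append]
  apply List.map_congr_left
  intro eleb _
  simpa using foldl_app_map t (f eleb) []

-- ===== VERDICT (by name: the statement is the Claim_ definition above) =====
theorem XinnerproductB_spec : Claim_equal_XinnerproductB := by
  intro t _ hpre
  show XinnerproductB t = XinnerproductB_alt t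
  unfold XinnerproductB XinnerproductB_alt
  rw [outer]
  simp only [List.map_map]
  apply List.map_congr_left
  intro r hr
  apply List.map_congr_left
  intro s hs
  exact (entryB_eq r s (hpre r hr s hs)).symm
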